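-- pv_equiv track=rewrite | github.com/YonatanLevy97/Intro2CS | ex8/puzzle_solver.py | max_min_seen_left
-- ===== SOURCE A (Python) =====
-- def max_min_seen_left(picture: list[list[int]], row: int, col: int, max_or_min: int) -> int:
--     """
--     :param max_or_min: 0 is for max and 1 is for min
--     :return: return the num of seen cells on the cells at the left side
--     """
--     is_first_col = col < 0
--     if max_or_min == 0:
--         if picture[row][col] == 0 or is_first_col:
--             return 0
--     else:
--         if picture[row][col] != 1 or is_first_col:
--             return 0
--     return 1 + max_min_seen_left(picture, row, col - 1, max_or_min)
-- ===== SOURCE B (Python) =====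
-- def max_min_seen_left(picture: list[list[int]], row: int, col: int, max_or_min: int) -> int:
--     r = picture[row]
--     seg = r[:col + 1][::-1] if col >= 0 else []
--     if max_or_min == 0:
--         idx = next((i for i, c in enumerate(seg) if c == 0), None)
--     else:
--         idx = next((i for i, c in enumerate(seg) if c != 1), None)
--     return len(seg) if idx is None else idx
-- ===== Notes on version B (the rewrite author's own statement) =====
-- stated objective: alternative
-- what changed: Instead of recursing cell by cell, B slices out the reversed left segment of the row and returns the index of the first blocking cell in it (or the segment length if none), found with enumerate/next.
import Mathlib
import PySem

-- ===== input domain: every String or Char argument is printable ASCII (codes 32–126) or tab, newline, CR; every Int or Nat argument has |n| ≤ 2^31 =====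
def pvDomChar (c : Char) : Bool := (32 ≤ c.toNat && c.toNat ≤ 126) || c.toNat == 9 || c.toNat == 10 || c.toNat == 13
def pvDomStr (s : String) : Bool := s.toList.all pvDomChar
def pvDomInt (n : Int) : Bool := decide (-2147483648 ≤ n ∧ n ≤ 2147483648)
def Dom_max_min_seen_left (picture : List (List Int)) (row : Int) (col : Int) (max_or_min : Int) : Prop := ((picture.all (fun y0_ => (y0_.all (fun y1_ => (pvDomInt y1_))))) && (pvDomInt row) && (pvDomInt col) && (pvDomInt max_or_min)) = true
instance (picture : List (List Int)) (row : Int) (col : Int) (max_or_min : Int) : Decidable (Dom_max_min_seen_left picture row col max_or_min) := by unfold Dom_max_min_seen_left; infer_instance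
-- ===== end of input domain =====

-- B replaces A's per-cell recursion by a slice-and-search: it reverses the left segment of the
-- row and returns the index of the first blocking cell (or the segment length); return-value
-- equivalence on Pre_ (alternative decomposition, no mutation involved).

-- ===== PORT A =====
-- Literal port of A's recursion, made total with a fuel that exceeds the recursion depth
-- ((col+2).toNat: A recurses only while col ≥ 0, so the depth is at most col+2; at fuel 0,
-- only reached when col ≤ -2, Python A returns 0 whenever its cell read succeeds, which Pre_ guarantees).
-- The cell picture[row][col] is read unconditionally, as in A (pyGet? none = IndexError, excluded by Pre_; the port returns 0 there).
def mmslRecA (picture : List (List Int)) (row : Int) (max_or_min : Int) : Nat → Int → Int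
  | 0, _ => 0
  | fuel + 1, col =>
    let is_first_col := col < 0
    match PySem.List.pyGet? picture row with
    | none => 0  -- IndexError in Python; outside Pre_
    | some r =>
      match PySem.List.pyGet? r col with
      | none => 0  -- IndexError in Python; outside Pre_
      | some cell =>
        if max_or_min == 0 then
          if cell == 0 || decide is_first_col then 0
          else 1 + mmslRecA picture row max_or_min fuel (col - 1)
        else
          if cell != 1 || decide is_first_col then 0
          else 1 + mmslRecA picture row max_or_min fuel (col - 1)

def max_min_seen_left (picture : List (List Int)) (row : Int) (col : Int) (max_or_min : Int) : Int :=
  mmslRecA picture row max_or_min (col + 2).toNat col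

-- ===== PORT B =====
-- 'return len(seg) if idx is None else idx' where idx = next((i for i,c in enumerate(seg) if stop c), None):
-- the first index of seg satisfying stop, i.e. List.findIdx?, defaulting to the length.
def mmslFirstStop (seg : List Int) (stop : Int → Bool) : Int :=
  match seg.findIdx? stop with
  | none => (seg.length : Int)
  | some i => (i : Int)

-- seg = r[:col+1][::-1] if col >= 0 else []; the stopping predicate is chosen once by max_or_min.
def max_min_seen_left_alt (picture : List (List Int)) (row : Int) (col : Int) (max_or_min : Int) : Int :=
  match PySem.List.pyGet? picture row with
  | none => 0  -- IndexError in Python (r = picture[row]); outside Pre_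
  | some r =>
    let seg := if col ≥ 0 then (PySem.List.slice r none (some (col + 1))).reverse else ([] : List Int)
    let stop : Int → Bool := if max_or_min == 0 then (fun c => c == 0) else (fun c => !(c == 1))
    mmslFirstStop seg stop

-- ===== PRECONDITION & SPEC =====
-- Pre_ admits exactly the inputs on which Python A returns: the row index is valid and the
-- (possibly negative) initial column index is within Python's index range for that row.
def Pre_max_min_seen_left (picture : List (List Int)) (row : Int) (col : Int) (max_or_min : Int) : Prop :=
  (PySem.List.pyGet? picture row).isSome ∧
  ∀ r ∈ PySem.List.pyGet? picture row, (-(r.length : Int) ≤ col ∧ col < (r.length : Int))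
instance (picture : List (List Int)) (row : Int) (col : Int) (max_or_min : Int) : Decidable (Pre_max_min_seen_left picture row col max_or_min) := by unfold Pre_max_min_seen_left; infer_instance

def pvWitness_max_min_seen_left : List (List Int) × Int × Int × Int := ([[1, 1, 0, 1]], 0, 3, 0)

def Spec_max_min_seen_left (picture : List (List Int)) (row : Int) (col : Int) (max_or_min : Int) (out : Int) : Prop := out = max_min_seen_left_alt picture row col max_or_min
instance (picture : List (List Int)) (row : Int) (col : Int) (max_or_min : Int) (out : Int) : Decidable (Spec_max_min_seen_left picture row col max_or_min out) := by unfold Spec_max_min_seen_left; infer_instance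

-- ===== CLAIM (what is proved, stated in full; the proofs are below) =====
def Claim_equal_max_min_seen_left : Prop := ∀ (picture : List (List Int)) (row : Int) (col : Int) (max_or_min : Int), Dom_max_min_seen_left picture row col max_or_min → Pre_max_min_seen_left picture row col max_or_min → Spec_max_min_seen_left picture row col max_or_min (max_min_seen_left picture row col max_or_min)

-- ===== LEMMAS AND PROOFS =====
lemma mmsl_cell_some (r : List Int) (col : Int) (hlo : -(r.length : Int) ≤ col)
    (hhi : col < (r.length : Int)) : ∃ cell, PySem.List.pyGet? r col = some cell := by
  have h : ¬ (PySem.List.pyGet? r col = none) := by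
    rw [PySem.List.pyGet?_eq_none_iff]
    simp [PySem.Raise.InRange]
    omega
  exact Option.ne_none_iff_exists'.mp h

lemma mmsl_cell_get (r : List Int) (n : Nat) (h : n < r.length) :
    PySem.List.pyGet? r (n : Int) = some (r[n]'h) := by
  rw [PySem.List.pyGet?_natCast]
  exact List.getElem?_eq_getElem h

-- B's search over a reversed take, peeled one cell at a time.
lemma mmslFirstStop_cons (x : Int) (xs : List Int) (stop : Int → Bool) :
    mmslFirstStop (x :: xs) stop = if stop x then 0 else 1 + mmslFirstStop xs stop := by
  unfold mmslFirstStop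
  rw [List.findIdx?_cons]
  by_cases hx : stop x
  · simp [hx]
  · simp only [hx]
    cases h : xs.findIdx? stop with
    | none => simp; omega
    | some i => simp; omega

lemma mmsl_take_reverse (r : List Int) (n : Nat) (h : n < r.length) :
    (r.take (n + 1)).reverse = r[n]'h :: (r.take n).reverse := by
  rw [List.take_add_one, List.getElem?_eq_getElem h]
  simp

-- A's recursion, unfolded one step at a nonnegative column with a successful cell read.
lemma mmslRecA_step (picture : List (List Int)) (row : Int) (max_or_min : Int) (r : List Int)
    (hr : PySem.List.pyGet? picture row = some r) (fuel : Nat) (col : Int) (hcol : 0 ≤ col)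
    (cell : Int) (hcell : PySem.List.pyGet? r col = some cell) :
    mmslRecA picture row max_or_min (fuel + 1) col =
      if (if max_or_min == 0 then (fun c => c == 0) else (fun c => !(c == 1))) cell then 0
      else 1 + mmslRecA picture row max_or_min fuel (col - 1) := by
  by_cases hm : max_or_min == 0 <;>
    simp only [mmslRecA, hr, hcell, hm, if_true, if_false, Bool.false_eq_true,
      show decide (col < 0) = false by simp; omega, Bool.or_false, bne]

-- A's recursion at a nonnegative column computes B's first-stop search on the reversed prefix.
lemma mmsl_key (picture : List (List Int)) (row : Int) (max_or_min : Int) (r : List Int)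
    (hr : PySem.List.pyGet? picture row = some r) :
    ∀ (n : Nat), n < r.length →
      mmslRecA picture row max_or_min (n + 2) (n : Int) =
        mmslFirstStop ((r.take (n + 1)).reverse)
          (if max_or_min == 0 then (fun c => c == 0) else (fun c => !(c == 1))) := by
  intro n
  induction n with
  | zero =>
    intro hlen
    have hcell := mmsl_cell_get r 0 hlen
    norm_cast at hcell
    obtain ⟨c1, hc1⟩ := mmsl_cell_some r (-1) (by omega) (by omega)
    have hstep := mmslRecA_step picture row max_or_min r hr 1 0 le_rfl _ hcell
    have h1 : mmslRecA picture row max_or_min 1 (0 - 1) = 0 := by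
      by_cases hm : max_or_min == 0 <;> simp [mmslRecA, hr, hc1, hm]
    rw [h1] at hstep
    rw [mmsl_take_reverse r 0 hlen, mmslFirstStop_cons]
    norm_num at hstep ⊢
    rw [hstep]
    simp [mmslFirstStop]
  | succ k ih =>
    intro hlen
    have hcell := mmsl_cell_get r (k + 1) hlen
    have hrec := ih (by omega)
    rw [mmsl_take_reverse r (k + 1) hlen, mmslFirstStop_cons,
      mmslRecA_step picture row max_or_min r hr (k + 2) ((k + 1 : Nat) : Int) (by omega) _ hcell]
    have hstep : ((k + 1 : Nat) : Int) - 1 = (k : Int) := by push_cast; ring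
    rw [hstep, hrec]

-- ===== VERDICT (by name: the statement is the Claim_ definition above) =====
theorem max_min_seen_left_spec : Claim_equal_max_min_seen_left := by
  intro picture row col max_or_min _ hpre
  obtain ⟨hs, hrange⟩ := hpre
  obtain ⟨r, hr⟩ := Option.isSome_iff_exists.mp hs
  have h := hrange r (by simp [hr])
  unfold Spec_max_min_seen_left max_min_seen_left_alt max_min_seen_left
  by_cases hc : 0 ≤ col
  · -- col ≥ 0: both sides reduce to the key lemma at n = col.toNat
    have hn : col = ((col.toNat : Nat) : Int) := by omega
    have hlen : col.toNat < r.length := by omega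
    rw [hn, hr]
    simp only [ge_iff_le, show (0 : Int) ≤ ((col.toNat : Nat) : Int) by omega, if_true]
    rw [show (((col.toNat : Nat) : Int) + 1) = ((col.toNat + 1 : Nat) : Int) by push_cast; ring,
      PySem.List.slice_to_natCast,
      show (((col.toNat : Nat) : Int) + 2).toNat = col.toNat + 2 by omega]
    exact mmsl_key picture row max_or_min r hr col.toNat hlen
  · -- col < 0: A stops at is_first_col (or fuel 0), B's segment is empty
    obtain ⟨cell, hcell⟩ := mmsl_cell_some r col h.1 h.2
    rw [hr]
    simp only [ge_iff_le, show ¬(0 : Int) ≤ col by omega, if_false]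
    by_cases h1 : col = -1
    · subst h1
      simp [mmslRecA, mmslFirstStop, hr, hcell]
    · have : (col + 2).toNat = 0 := by omega
      rw [this]
      simp [mmslRecA, mmslFirstStop]
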